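-- pv_equiv track=rewrite | github.com/EduardoZabala/Entrenamiento | Codeforces/Ejercicicios de codeforces 3.py | intercambiador
-- ===== SOURCE A (Python) =====
-- def intercambiador(lista_numero):
--     longitud=len(lista_numero)-1
--     numero_pequeño=min(lista_numero)
--
--     while longitud>=1:
--         indice=lista_numero.index(numero_pequeño)
--         if indice!=0:
--             aux=lista_numero[indice-1]
--             lista_numero[indice-1]=numero_pequeño
--             lista_numero[indice]=aux
--             lista_numero.pop(longitud)
--         else:
--             aux_indice=indice+1
--             aux_numero=lista_numero[aux_indice]
--             lista_numero[aux_indice]=lista_numero[indice]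
--             lista_numero[indice]=aux_numero
--             lista_numero.pop(longitud)
--         longitud-=1
--     return lista_numero[0]
-- ===== SOURCE B (Python) =====
-- def intercambiador(lista_numero):
--     numero_pequeño = min(lista_numero)
--     indice = lista_numero.index(numero_pequeño)
--     restante = len(lista_numero) - 1 - indice
--     if restante % 2 == 0:
--         return numero_pequeño
--     return lista_numero[1] if indice == 0 else lista_numero[0]
-- ===== Notes on version B (the rewrite author's own statement) =====
-- stated objective: faster
-- what changed: Replaces the O(n^2) simulation (re-scanning with .index, swapping and popping every iteration) with an O(n) closed form: the minimum bubbles left to position 0 and then toggles between positions 0 and 1, so the result is the minimum iff the number of remaining iterations after it reaches the front is even, else the one element it keeps swapping with.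
import Mathlib
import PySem

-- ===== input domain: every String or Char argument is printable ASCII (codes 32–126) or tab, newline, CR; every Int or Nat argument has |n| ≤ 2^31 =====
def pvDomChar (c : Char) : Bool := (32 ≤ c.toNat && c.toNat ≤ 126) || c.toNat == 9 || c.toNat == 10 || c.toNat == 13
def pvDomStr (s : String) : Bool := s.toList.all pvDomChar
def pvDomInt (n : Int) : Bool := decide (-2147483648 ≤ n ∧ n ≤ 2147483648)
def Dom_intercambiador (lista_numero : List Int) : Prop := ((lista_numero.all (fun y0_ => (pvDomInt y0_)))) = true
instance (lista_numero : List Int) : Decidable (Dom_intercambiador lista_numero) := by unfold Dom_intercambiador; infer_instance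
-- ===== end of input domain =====

-- B replaces A's O(n^2) swap-and-pop simulation by an O(n) closed form (min + first index + parity);
-- A mutates its argument in place (swaps elements and pops from it): the equivalence proved is about the return value only.

-- ===== PORT A =====
-- A's while loop; the fuel is Python's `longitud`, which is always the current length - 1 and decreases by 1.
def intercambiadorLoop (numero_pequeño : Int) : Nat → List Int → List Int
  | 0, lista => lista
  | longitud + 1, lista =>
    -- indice = lista_numero.index(numero_pequeño); the min is in the list, so .index never raises: getD 0 unreachable
    let indice : Nat := (PySem.List.index? lista numero_pequeño).getD 0
    if indice ≠ 0 then
      let aux := (PySem.List.pyGet? lista ((indice : Int) - 1)).getD 0      -- in range: indice ≥ 1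
      let lista1 := PySem.List.pySetD lista ((indice : Int) - 1) numero_pequeño
      let lista2 := PySem.List.pySetD lista1 (indice : Int) aux
      let lista3 := ((PySem.List.pop? lista2 ((longitud : Int) + 1)).map Prod.snd).getD lista2
      intercambiadorLoop numero_pequeño longitud lista3
    else
      let aux_indice : Int := (indice : Int) + 1
      let aux_numero := (PySem.List.pyGet? lista aux_indice).getD 0        -- in range: the loop runs only with length ≥ 2
      let lista1 := PySem.List.pySetD lista aux_indice ((PySem.List.pyGet? lista (indice : Int)).getD 0)
      let lista2 := PySem.List.pySetD lista1 (indice : Int) aux_numero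
      let lista3 := ((PySem.List.pop? lista2 ((longitud : Int) + 1)).map Prod.snd).getD lista2
      intercambiadorLoop numero_pequeño longitud lista3

def intercambiador (lista_numero : List Int) : Int :=
  match PySem.List.min? lista_numero (fun x => x) with
  | none => 0            -- Python: min([]) raises ValueError; excluded by Pre_
  | some numero_pequeño =>
    let longitud := lista_numero.length - 1
    (PySem.List.pyGet? (intercambiadorLoop numero_pequeño longitud lista_numero) 0).getD 0

-- ===== PORT B =====
def intercambiador_alt (lista_numero : List Int) : Int :=
  match PySem.List.min? lista_numero (fun x => x) with
  | none => 0            -- Python: min([]) raises ValueError; excluded by Pre_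
  | some numero_pequeño =>
    let indice : Nat := (PySem.List.index? lista_numero numero_pequeño).getD 0   -- min ∈ list: never raises
    let restante : Int := (lista_numero.length : Int) - 1 - (indice : Int)
    if PySem.Int.mod restante 2 = 0 then numero_pequeño
    else if indice = 0 then (PySem.List.pyGet? lista_numero 1).getD 0
    else (PySem.List.pyGet? lista_numero 0).getD 0

-- ===== PRECONDITION & SPEC =====
-- Pre_ excludes only the empty list, on which Python's min([]) raises ValueError (in A and in B alike).
def Pre_intercambiador (lista_numero : List Int) : Prop := lista_numero ≠ []
instance (lista_numero : List Int) : Decidable (Pre_intercambiador lista_numero) := by unfold Pre_intercambiador; infer_instance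
def pvWitness_intercambiador : List Int := [3, 1, 2]

def Spec_intercambiador (lista_numero : List Int) (out : Int) : Prop := out = intercambiador_alt lista_numero
instance (lista_numero : List Int) (out : Int) : Decidable (Spec_intercambiador lista_numero out) := by unfold Spec_intercambiador; infer_instance

-- ===== CLAIM (what is proved, stated in full; the proofs are below) =====
def Claim_equal_intercambiador : Prop := ∀ (lista_numero : List Int), Dom_intercambiador lista_numero → Pre_intercambiador lista_numero → Spec_intercambiador lista_numero (intercambiador lista_numero)

-- ===== LEMMAS AND PROOFS =====

-- the closed form both ports are reduced to (i = first index of the minimum m)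
def pvG (m : Int) (i : Nat) (l : List Int) : Int :=
  if (l.length - 1 - i) % 2 = 0 then m
  else if i = 0 then (l[1]?).getD 0 else (l[0]?).getD 0

lemma pv_set_mid (pre t : List Int) (x v : Int) :
    (pre ++ x :: t).set pre.length v = pre ++ v :: t := by
  induction pre with
  | nil => rfl
  | cons h t ih => simp [ih]

-- one iteration of A's loop when the minimum is not at the front
lemma pv_step_pos (m a : Int) (k : Nat) (pre suf : List Int)
    (hm : m ∉ pre ++ [a]) (hlen : pre.length + suf.length = k) :
    intercambiadorLoop m (k+1) (pre ++ a :: m :: suf)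
      = intercambiadorLoop m k ((pre ++ m :: a :: suf).dropLast) := by
  have hidx : PySem.List.index? (pre ++ a :: m :: suf) m = some (pre.length + 1) := by
    rw [show pre ++ a :: m :: suf = (pre ++ [a]) ++ m :: suf by simp]
    exact (PySem.List.index?_eq_some_iff _ _ _).mpr ⟨pre ++ [a], suf, rfl, by simp, hm⟩
  have hget : PySem.List.pyGet? (pre ++ a :: m :: suf) ((((pre.length + 1 : Nat)) : Int) - 1) = some a := by
    rw [show (((pre.length + 1 : Nat)) : Int) - 1 = ((pre.length : Nat) : Int) by push_cast; ring]
    exact PySem.List.pyGet?_append_length _ _ _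
  have hs1 : PySem.List.pySetD (pre ++ a :: m :: suf) ((((pre.length + 1 : Nat)) : Int) - 1) m
      = pre ++ m :: m :: suf := by
    rw [show (((pre.length + 1 : Nat)) : Int) - 1 = ((pre.length : Nat) : Int) by push_cast; ring,
      PySem.List.pySetD_natCast, pv_set_mid]
  have hs2 : PySem.List.pySetD (pre ++ m :: m :: suf) (((pre.length + 1 : Nat)) : Int) a
      = pre ++ m :: a :: suf := by
    rw [show pre ++ m :: m :: suf = (pre ++ [m]) ++ m :: suf by simp,
      show ((pre.length + 1 : Nat) : Int) = ((pre ++ [m]).length : Int) by simp,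
      PySem.List.pySetD_natCast, pv_set_mid]
    simp
  have hpop := PySem.List.pop?_natCast (xs := pre ++ m :: a :: suf) (n := k+1) (by simp; omega)
  rw [show ((k+1:Nat):Int) = (k:Int)+1 by push_cast; ring] at hpop
  have herase : (pre ++ m :: a :: suf).eraseIdx (k+1) = (pre ++ m :: a :: suf).dropLast :=
    List.eraseIdx_eq_dropLast (by simp; omega)
  simp only [intercambiadorLoop, hidx, Option.getD_some]
  rw [if_pos (by omega)]
  rw [hget]
  simp only [Option.getD_some]
  rw [hs1, hs2, hpop]
  simp only [Option.map_some, Option.getD_some]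
  rw [herase]

-- one iteration of A's loop when the minimum is at the front
lemma pv_step_zero (m b : Int) (k : Nat) (rest : List Int) (hlen : rest.length = k) :
    intercambiadorLoop m (k+1) (m :: b :: rest)
      = intercambiadorLoop m k ((b :: m :: rest).dropLast) := by
  have hidx : PySem.List.index? (m :: b :: rest) m = some 0 :=
    PySem.List.index?_cons_self m (b :: rest)
  have hpop := PySem.List.pop?_natCast (xs := b :: m :: rest) (n := k+1) (by simp [hlen])
  rw [show ((k+1:Nat):Int) = (k:Int)+1 by push_cast; ring] at hpop
  have herase : (b :: m :: rest).eraseIdx (k+1) = (b :: m :: rest).dropLast :=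
    List.eraseIdx_eq_dropLast (by simp [hlen])
  simp only [intercambiadorLoop, hidx, Option.getD_some]
  norm_num
  have hget1 : PySem.List.pyGet? (m :: b :: rest) (1 : Int) = some b := by
    simp
  have hget0 : PySem.List.pyGet? (m :: b :: rest) ((0:Nat) : Int) = some m := by simp
  have hset : PySem.List.pySetD (PySem.List.pySetD (m :: b :: rest) 1 m) 0 b = b :: m :: rest := by
    simp [PySem.List.pySetD_of_nonneg]
  rw [hset, hpop]
  simp only [Option.map_some, Option.getD_some]
  rw [herase]
  cases rest <;> simp

-- A's loop ends with the closed form pvG at the front of the list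
lemma pv_loop_head (k : Nat) : ∀ (m : Int) (l : List Int) (i : Nat),
    l.length = k + 1 → PySem.List.index? l m = some i → (∀ x ∈ l, m ≤ x) →
    (PySem.List.pyGet? (intercambiadorLoop m k l) 0).getD 0 = pvG m i l := by
  induction k with
  | zero =>
    intro m l i hlen hidx _
    obtain ⟨x, rfl⟩ : ∃ x, l = [x] := by
      cases l with
      | nil => simp at hlen
      | cons x t => cases t with
        | nil => exact ⟨x, rfl⟩
        | cons y t => simp at hlen
    have hx : m = x ∧ i = 0 := by
      rcases (PySem.List.index?_eq_some_iff _ _ _).mp hidx with ⟨pre, suf, he, hl, _⟩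
      cases pre with
      | nil => simp at he; simp [he.1, ← hl]
      | cons p ps => simp at he
    simp [intercambiadorLoop, pvG, hx.1, hx.2]
  | succ k ih =>
    intro m l i hlen hidx hmin
    rcases (PySem.List.index?_eq_some_iff _ _ _).mp hidx with ⟨pre, suf, rfl, rfl, hpre⟩
    rcases List.eq_nil_or_concat pre with hnil | ⟨pre', aa, rfl⟩
    · -- minimum at the front
      subst hnil
      simp only [List.nil_append] at hlen hmin hidx ⊢
      obtain ⟨b, rest, rfl⟩ : ∃ b rest, suf = b :: rest := by
        cases suf with
        | nil => simp at hlen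
        | cons b rest => exact ⟨b, rest, rfl⟩
      simp only [List.length_nil] at hidx ⊢
      have hlr : rest.length = k := by simp at hlen; omega
      rw [pv_step_zero m b k rest hlr]
      rcases List.eq_nil_or_concat rest with hnil | ⟨rest', z, rfl⟩
      · subst hnil
        have hk : k = 0 := by simp at hlr; omega
        subst hk
        simp [intercambiadorLoop, pvG]
      · simp only [List.concat_eq_append] at hlr hmin ⊢
        have hlr' : rest'.length + 1 = k := by simp at hlr; omega
        have hdl : (b :: m :: (rest' ++ [z])).dropLast = b :: m :: rest' := by
          rw [show b :: m :: (rest' ++ [z]) = (b :: m :: rest') ++ [z] by simp, List.dropLast_concat]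
        rw [hdl]
        by_cases hbm : b = m
        · subst hbm
          have hidx' : PySem.List.index? (b :: b :: rest') b = some 0 :=
            PySem.List.index?_cons_self b (b :: rest')
          rw [ih b (b :: b :: rest') 0 (by simp; omega) hidx'
            (by intro x hx; exact hmin x (by simp at hx ⊢; tauto))]
          simp only [pvG]
          split_ifs <;> simp
        · have hidx' : PySem.List.index? (b :: m :: rest') m = some 1 :=
            (PySem.List.index?_eq_some_iff _ _ _).mpr ⟨[b], rest', rfl, rfl, fun h => hbm (List.mem_singleton.mp h).symm⟩
          rw [ih m (b :: m :: rest') 1 (by simp; omega) hidx'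
            (by intro x hx; exact hmin x (by simp at hx ⊢; tauto))]
          simp only [pvG, List.length_cons, List.length_append, List.length_nil]
          split_ifs <;> first | rfl | contradiction | omega | simp
    · -- minimum strictly inside: it bubbles one step left
      simp only [List.concat_eq_append] at hlen hmin hpre hidx ⊢
      have hpre' : m ∉ pre' ++ [aa] := hpre
      have hassoc : (pre' ++ [aa]) ++ m :: suf = pre' ++ aa :: m :: suf := by simp
      rw [hassoc] at hlen hmin ⊢
      have hlen' : pre'.length + suf.length = k := by simp at hlen; omega
      rw [pv_step_pos m aa k pre' suf hpre' hlen']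
      have hm' : m ∉ pre' := fun h => hpre' (by simp [h])
      rcases List.eq_nil_or_concat suf with hnil | ⟨suf', z, rfl⟩
      · subst hnil
        have hdl : (pre' ++ m :: aa :: ([] : List Int)).dropLast = pre' ++ [m] := by
          rw [show pre' ++ [m, aa] = (pre' ++ [m]) ++ [aa] by simp, List.dropLast_concat]
        rw [hdl]
        have hidx' : PySem.List.index? (pre' ++ [m]) m = some pre'.length :=
          (PySem.List.index?_eq_some_iff _ _ _).mpr ⟨pre', [], rfl, rfl, hm'⟩
        rw [ih m (pre' ++ [m]) pre'.length (by simp at hlen' ⊢; omega) hidx'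
          (by intro x hx; exact hmin x (by simp at hx ⊢; tauto))]
        simp only [pvG, List.length_append, List.length_cons, List.length_nil]
        split_ifs <;> first | rfl | contradiction | omega | simp
      · simp only [List.concat_eq_append] at hlen' hmin ⊢
        have hdl : (pre' ++ m :: aa :: (suf' ++ [z])).dropLast = pre' ++ m :: aa :: suf' := by
          rw [show pre' ++ m :: aa :: (suf' ++ [z]) = (pre' ++ m :: aa :: suf') ++ [z] by simp,
            List.dropLast_concat]
        rw [hdl]
        have hidx' : PySem.List.index? (pre' ++ m :: aa :: suf') m = some pre'.length :=
          (PySem.List.index?_eq_some_iff _ _ _).mpr ⟨pre', aa :: suf', rfl, rfl, hm'⟩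
        rw [ih m (pre' ++ m :: aa :: suf') pre'.length (by simp at hlen' ⊢; omega) hidx'
          (by intro x hx; exact hmin x (by simp at hx ⊢; tauto))]
        rcases pre' with _ | ⟨p, ps⟩
        · simp only [pvG, List.nil_append, List.length_cons, List.length_append, List.length_nil]
          split_ifs <;> first | rfl | contradiction | omega | simp
        · simp only [pvG, List.length_cons, List.length_append, List.length_nil]
          split_ifs <;> first | rfl | contradiction | omega | simp

-- B computes the closed form pvG
lemma pv_alt_eq (m : Int) (i : Nat) (l : List Int)
    (hmin : PySem.List.min? l (fun x => x) = some m)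
    (hidx : PySem.List.index? l m = some i) :
    intercambiador_alt l = pvG m i l := by
  have hi : i < l.length := by
    rcases (PySem.List.index?_eq_some_iff _ _ _).mp hidx with ⟨pre, suf, rfl, rfl, _⟩
    simp
  unfold intercambiador_alt
  rw [hmin]
  simp only [hidx, Option.getD_some]
  have hcast : ((l.length : Int) - 1 - (i : Int)) = ((l.length - 1 - i : Nat) : Int) := by
    push_cast; omega
  rw [hcast]
  have h2 : (PySem.Int.mod (((l.length - 1 - i : Nat)) : Int) 2 = 0) ↔ ((l.length - 1 - i) % 2 = 0) := by
    rw [PySem.Int.mod_eq_emod_of_pos (by norm_num)]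
    omega
  unfold pvG
  rw [if_congr h2 rfl rfl,
    show (1:Int) = ((1:Nat):Int) by norm_num, PySem.List.pyGet?_natCast, PySem.List.pyGet?_zero]

-- ===== VERDICT (by name: the statement is the Claim_ definition above) =====
theorem intercambiador_spec : Claim_equal_intercambiador := by
  intro l _ hpre
  unfold Spec_intercambiador
  obtain ⟨m, hmin⟩ : ∃ m, PySem.List.min? l (fun x => x) = some m := by
    cases hm : PySem.List.min? l (fun x => x) with
    | none => exact absurd ((PySem.List.min?_eq_none_iff _ _).mp hm) hpre
    | some m => exact ⟨m, rfl⟩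
  have hmem : m ∈ l := PySem.List.min?_mem hmin
  obtain ⟨i, hidx⟩ : ∃ i, PySem.List.index? l m = some i := by
    cases hI : PySem.List.index? l m with
    | none => exact absurd ((PySem.List.index?_eq_none_iff _ _).mp hI) (by simp [hmem])
    | some i => exact ⟨i, rfl⟩
  rw [pv_alt_eq m i l hmin hidx]
  unfold intercambiador
  rw [hmin]
  exact pv_loop_head (l.length - 1) m l i (by cases l with | nil => exact absurd rfl hpre | cons a t => simp) hidx
    (fun x hx => PySem.List.min?_isMin hmin x hx)
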